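-- pv_equiv track=rewrite | github.com/Kache/advent_of_code | 2025/day01.py | password1
-- ===== SOURCE A (Python) =====
-- def password1(rotations: list[str], start: int = 50):
--     num = 0
--     curr = start
--     for rot in rotations:
--         curr = turn(curr, rot)
--         if curr == 0:
--             num += 1
--
--     return  num
--
-- def turn(at: int, n: int | str):
--     if isinstance(n, str):
--         sign = -1 if n[0] == 'L' else 1
--         n = int(n[1:]) * sign
--
--     return (at + n) % 100
-- ===== SOURCE B (Python) =====
-- def _delta(n):
--     # parse one rotation into a signed delta; ints pass through unchanged
--     if isinstance(n, str):
--         sign = -1 if n[0] == 'L' else 1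
--         n = int(n[1:]) * sign
--     return n
--
--
-- def password1(rotations: list[str], start: int = 50):
--     # Divide and conquer: solve(lo, hi, base) counts the prefixes ending inside
--     # deltas[lo:hi] that land on a multiple of 100 when started from base, and
--     # also returns the segment sum so the right half can be solved independently.
--     deltas = [_delta(rot) for rot in rotations]
--
--     def solve(lo, hi, base):
--         if hi - lo == 1:
--             d = deltas[lo]
--             return (1 if (base + d) % 100 == 0 else 0, d)
--         mid = (lo + hi) // 2
--         c1, s1 = solve(lo, mid, base)
--         c2, s2 = solve(mid, hi, base + s1)
--         return (c1 + c2, s1 + s2)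
--
--     if not deltas:
--         return 0
--     return solve(0, len(deltas), start)[0]
-- ===== Notes on version B (the rewrite author's own statement) =====
-- stated objective: alternative
-- what changed: B replaces A's single left-to-right loop threading a mod-100 position with a divide-and-conquer recursion: it parses the deltas once, then recursively splits the list in halves, each call returning (count of zero-landings inside the segment, segment sum), combining the right half with the left half's sum as its base.
import Mathlib
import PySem

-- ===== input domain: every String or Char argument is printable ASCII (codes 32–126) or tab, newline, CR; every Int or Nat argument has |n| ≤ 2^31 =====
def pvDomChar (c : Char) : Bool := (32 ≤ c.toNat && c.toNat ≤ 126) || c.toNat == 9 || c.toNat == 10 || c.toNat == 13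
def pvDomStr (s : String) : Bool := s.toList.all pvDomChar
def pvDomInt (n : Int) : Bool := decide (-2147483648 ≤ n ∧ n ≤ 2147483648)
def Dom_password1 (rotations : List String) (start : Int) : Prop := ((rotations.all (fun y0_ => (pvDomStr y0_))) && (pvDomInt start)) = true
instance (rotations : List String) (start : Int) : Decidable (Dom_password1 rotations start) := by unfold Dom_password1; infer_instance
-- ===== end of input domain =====

-- B replaces A's single stateful loop by parse-then-divide-and-conquer over halves;
-- same values on Pre_ (where the shared parse succeeds); no speed claim.

-- ===== PORT A =====
-- turn(at, n) for the string case (rotations : list[str], so the isinstance branch is always taken).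
-- n[0] raises IndexError on "" and int(n[1:]) raises ValueError on a bad literal: Pre_ excludes both,
-- so the .getD defaults are never reached on admitted inputs.
def turnA (at_ : Int) (n : String) : Int :=
  let sign : Int := if PySem.Str.pyGet? n 0 = some 'L' then -1 else 1
  let m : Int := (PySem.Int.ofStr? (PySem.Str.slice n (some 1) none)).getD 0 * sign
  PySem.Int.mod (at_ + m) 100

def password1 (rotations : List String) (start : Int) : Int :=
  (rotations.foldl
    (fun (p : Int × Int) rot =>
      let curr := turnA p.2 rot
      if curr = 0 then (p.1 + 1, curr) else (p.1, curr))
    (0, start)).1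

-- ===== PORT B =====
-- _delta: parse one rotation into a signed delta (string branch of Source B's _delta)
def deltaB (n : String) : Int :=
  let sign : Int := if PySem.Str.pyGet? n 0 = some 'L' then -1 else 1
  (PySem.Int.ofStr? (PySem.Str.slice n (some 1) none)).getD 0 * sign

-- Source B's solve(lo, hi, base) on the slice deltas[lo:hi]: returns
-- (count of prefixes of the segment landing on a multiple of 100 starting from base, segment sum);
-- the Python indices lo/hi become the list segment itself (take/drop at mid).
def solveB (ds : List Int) (base : Int) : Int × Int :=
  match h : ds with
  | [] => (0, 0)
  | [d] => ((if PySem.Int.mod (base + d) 100 = 0 then 1 else 0), d)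
  | _ :: _ :: _ =>
    let mid := ds.length / 2
    let p1 := solveB (ds.take mid) base
    let p2 := solveB (ds.drop mid) (base + p1.2)
    (p1.1 + p2.1, p1.2 + p2.2)
termination_by ds.length
decreasing_by
  · subst h; simp [List.length_take]; omega
  · subst h; simp [List.length_drop]; omega

def password1_alt (rotations : List String) (start : Int) : Int :=
  let deltas := rotations.map deltaB
  match deltas with
  | [] => 0
  | _ :: _ => (solveB deltas start).1

-- ===== PRECONDITION & SPEC =====
-- Pre_ excludes exactly the inputs where the Python raises: an empty rotation (IndexError on n[0])
-- or one whose tail is not a valid int literal (ValueError in int(n[1:])). Both A and B raise there.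
def Pre_password1 (rotations : List String) (start : Int) : Prop :=
  ∀ rot ∈ rotations, rot.toList ≠ [] ∧ (PySem.Int.ofStr? (PySem.Str.slice rot (some 1) none)).isSome
instance (rotations : List String) (start : Int) : Decidable (Pre_password1 rotations start) := by
  unfold Pre_password1; infer_instance
def pvWitness_password1 : List String × Int := (["L10", "R60", "L50"], 50)

def Spec_password1 (rotations : List String) (start : Int) (out : Int) : Prop := out = password1_alt rotations start
instance (rotations : List String) (start : Int) (out : Int) : Decidable (Spec_password1 rotations start out) := by unfold Spec_password1; infer_instance

-- ===== CLAIM (what is proved, stated in full; the proofs are below) =====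
def Claim_equal_password1 : Prop := ∀ (rotations : List String) (start : Int), Dom_password1 rotations start → Pre_password1 rotations start → Spec_password1 rotations start (password1 rotations start)

-- ===== LEMMAS AND PROOFS =====

-- reference linear count: number of prefixes of ds whose running absolute sum (from base) is ≡ 0 mod 100
def countPrefix : List Int → Int → Int
  | [], _ => 0
  | d :: ds, base => (if PySem.Int.mod (base + d) 100 = 0 then 1 else 0) + countPrefix ds (base + d)

lemma countPrefix_append (xs ys : List Int) :
    ∀ base : Int, countPrefix (xs ++ ys) base = countPrefix xs base + countPrefix ys (base + xs.sum) := by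
  induction xs with
  | nil => intro base; simp [countPrefix]
  | cons d xs ih =>
    intro base
    simp only [List.cons_append, countPrefix, ih (base + d), List.sum_cons]
    ring_nf

-- stepwise Python-mod update agrees with the mod of the full running sum
lemma mod_step (curr s d : Int) (h : PySem.Int.mod curr 100 = PySem.Int.mod s 100) :
    PySem.Int.mod (curr + d) 100 = PySem.Int.mod (s + d) 100 := by
  have h100 : (0:Int) < 100 := by norm_num
  simp only [PySem.Int.mod_eq_emod_of_pos h100] at h ⊢
  calc (curr + d) % 100 = (curr % 100 + d) % 100 := (Int.emod_add_emod _ _ _).symm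
    _ = (s % 100 + d) % 100 := by rw [h]
    _ = (s + d) % 100 := Int.emod_add_emod _ _ _

lemma mod_idem (x : Int) : PySem.Int.mod (PySem.Int.mod x 100) 100 = PySem.Int.mod x 100 := by
  simp only [PySem.Int.mod_eq_emod_of_pos (by norm_num : (0:Int) < 100)]
  exact Int.emod_emod_of_dvd _ dvd_rfl

-- A's loop counts exactly countPrefix of the parsed deltas
lemma loopA_eq (rots : List String) :
    ∀ (num base curr : Int), PySem.Int.mod curr 100 = PySem.Int.mod base 100 →
    (rots.foldl
      (fun (p : Int × Int) rot =>
        let c := turnA p.2 rot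
        if c = 0 then (p.1 + 1, c) else (p.1, c))
      (num, curr)).1
    = num + countPrefix (rots.map deltaB) base := by
  induction rots with
  | nil => intro num base curr _; simp [countPrefix]
  | cons rot rs ih =>
    intro num base curr h
    have hturn : turnA curr rot = PySem.Int.mod (base + deltaB rot) 100 :=
      mod_step curr base (deltaB rot) h
    have hnext : PySem.Int.mod (turnA curr rot) 100 = PySem.Int.mod (base + deltaB rot) 100 := by
      rw [hturn]; exact mod_idem _
    simp only [List.foldl_cons, List.map_cons, countPrefix]
    by_cases hz : turnA curr rot = 0
    · rw [if_pos hz, ih (num + 1) (base + deltaB rot) _ hnext]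
      have hc : PySem.Int.mod (base + deltaB rot) 100 = 0 := by rw [← hturn, hz]
      rw [if_pos hc]; ring
    · rw [if_neg hz, ih num (base + deltaB rot) _ hnext]
      have hc : ¬ PySem.Int.mod (base + deltaB rot) 100 = 0 := by rw [← hturn]; exact hz
      rw [if_neg hc]; ring

-- B's divide-and-conquer computes (countPrefix, sum)
lemma solveB_eq : ∀ (n : Nat) (ds : List Int) (base : Int), ds.length ≤ n →
    solveB ds base = (countPrefix ds base, ds.sum) := by
  intro n
  induction n with
  | zero =>
    intro ds base h
    match ds with
    | [] => simp [solveB, countPrefix]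
    | d :: ds => simp at h
  | succ n ih =>
    intro ds base h
    match ds with
    | [] => simp [solveB, countPrefix]
    | [d] => simp [solveB, countPrefix]
    | d1 :: d2 :: t =>
      rw [solveB]
      have hlen : (d1 :: d2 :: t).length = t.length + 2 := by simp
      set L : List Int := d1 :: d2 :: t with hL
      have hmid : L.length / 2 ≥ 1 ∧ L.length / 2 < L.length := by
        rw [hL]; simp; omega
      have h1 : (L.take (L.length / 2)).length ≤ n := by
        simp [List.length_take]; rw [hL] at h ⊢; simp at h ⊢; omega
      have h2 : (L.drop (L.length / 2)).length ≤ n := by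
        simp [List.length_drop]; rw [hL] at h ⊢; simp at h ⊢; omega
      simp only [ih _ _ h1, ih _ _ h2]
      have hsplit := List.take_append_drop (L.length / 2) L
      have hcnt := countPrefix_append (L.take (L.length / 2)) (L.drop (L.length / 2)) base
      rw [hsplit] at hcnt
      have hsum : (L.take (L.length / 2)).sum + (L.drop (L.length / 2)).sum = L.sum := by
        conv_rhs => rw [← hsplit]
        simp
      exact Prod.ext (by rw [hcnt]) (by simpa using hsum)

-- ===== VERDICT (by name: the statement is the Claim_ definition above) =====
theorem password1_spec : Claim_equal_password1 := by
  intro rotations start _ _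
  show password1 rotations start = password1_alt rotations start
  cases rotations with
  | nil => simp [password1, password1_alt]
  | cons r rs =>
    unfold password1 password1_alt
    simp only [List.map_cons]
    rw [loopA_eq (r :: rs) 0 start start rfl,
        solveB_eq (rs.length + 1) (deltaB r :: rs.map deltaB) start (by simp)]
    simp [List.map_cons]
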